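-- pv_equiv track=rewrite | github.com/gridlab-d/gridlab-d | Python Scripts/Old OMF Scripts/chooseAction.py | chooseAction
-- ===== SOURCE A (Python) =====
-- actionDict = { 	 1:[ 'raise load',[1,1,1,1],[2,1,1,1],[2,1,2,1]],
-- 				-1: ['lower load',[3,3,3,3],[2,3,3,3],[2,3,2,3]],
-- 				 2: ['raise winter load',[3,3,1,1],[3,2,1,1],[2,3,1,1],[2,2,1,1],[2,3,2,1],[2,2,2,1]],
-- 				-2: ['lower winter load',[1,1,3,3],[1,2,3,3],[2,1,3,3],[2,2,3,3],[2,1,2,3],[2,2,2,3]],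
-- 				 3: ['raise winter peak',[3,3,1,3],[2,3,1,3],[2,2,1,3],[2,2,1,2],[2,3,1,2],[3,3,1,2]],
-- 				-3: ['lower winter peak',[1,1,3,1],[2,1,3,1],[2,2,3,1],[2,2,3,2],[2,1,3,2],[1,1,3,2]],
-- 				 4: ['raise winter & summer',[1,1,1,3],[2,1,1,3],[2,1,1,2],[1,1,1,2]],
-- 				-4: ['lower winter & summer',[3,3,3,1],[2,3,3,1],[2,3,3,2],[3,3,3,2]],
-- 				 5: ['raise summer load',[1,3,3,3],[1,3,2,3],[1,3,2,2],[1,2,2,3],[1,2,2,2],[1,1,2,2],[1,1,2,3],[2,1,2,2]],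
-- 				-5: ['lower summer load',[3,1,1,1],[3,1,2,1],[3,1,2,2],[3,2,2,1],[3,2,2,2],[3,3,2,2],[3,3,2,1],[2,3,2,2]],
-- 				 6: ['raise summer & winter',[1,3,1,1],[1,3,2,1],[1,1,2,1],[1,2,2,1]],
-- 				-6: ['lower summer & winter',[3,1,3,3],[3,1,2,3],[3,3,2,3],[3,1,1,3]],
-- 				 7: ['raise peaks',[1,3,1,3],[1,3,1,2],[1,2,1,2],[1,2,1,3],[1,2,1,1]],
-- 				-7: ['lower peaks',[3,1,3,1],[3,1,3,2],[3,2,3,2],[3,2,3,1],[3,2,3,3]],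
-- 				 8: ['raise summer & lower winter',[1,3,3,1],[1,2,3,1],[1,2,3,2],[1,3,3,2]],
-- 				-8: ['lower summer & raise winter',[3,1,1,3],[3,1,1,2],[3,2,1,3],[3,2,1,2]] };
--
-- def convert(d):
-- 	'''Takes list of 4 numbers and returns coded list based on higher, equal, less than 0.'''
-- 	[ps,es,pw,ew] = d;
-- 	v = [0,0,0,0];
-- 	if ps < 0:
-- 		v[0]=1;
-- 	elif ps == 0:
-- 		v[0]=2;
-- 	elif ps > 0:
-- 		v[0]=3;
-- 	if es < 0:
-- 		v[1]=1;
-- 	elif es == 0: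
-- 		v[1]=2;
-- 	elif es > 0:
-- 		v[1]=3;
-- 	if pw < 0:
-- 		v[2]=1;
-- 	elif pw == 0:
-- 		v[2]=2;
-- 	elif pw > 0:
-- 		v[2]=3;
-- 	if ew < 0:
-- 		v[3]=1;
-- 	elif ew == 0:
-- 		v[3]=2;
-- 	elif ew > 0:
-- 		v[3]=3;
-- 	return v;
--
-- def chooseAction(difs):
-- 	'''Using 4 main metrics, decide which action to take.'''
-- 	checkVal = convert(difs);
-- 	if  0 in checkVal:
-- 		print ("Ooops! Something is the matter.");
-- 		return;
-- 	else:
-- 		for i in actionDict.keys():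
-- 			if checkVal in actionDict[i]:
-- 				return i, actionDict[i][0];
-- ===== SOURCE B (Python) =====
-- # Action decision rewritten as an arithmetic perfect-hash table: each metric's sign
-- # is coded 1/2/3 arithmetically, packed into a 4-digit number, and looked up in a
-- # flat precomputed table (first action owning a code wins, as in the original scan).
--
-- def _sgncode(x):
--     return (x > 0) - (x < 0) + 2
--
-- _TABLE = {
--     1111: (1, 'raise load'),
--     1112: (4, 'raise winter & summer'),
--     1113: (4, 'raise winter & summer'),
--     1121: (6, 'raise summer & winter'),
--     1122: (5, 'raise summer load'),
--     1123: (5, 'raise summer load'),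
--     1131: (-3, 'lower winter peak'),
--     1132: (-3, 'lower winter peak'),
--     1133: (-2, 'lower winter load'),
--     1211: (7, 'raise peaks'),
--     1212: (7, 'raise peaks'),
--     1213: (7, 'raise peaks'),
--     1221: (6, 'raise summer & winter'),
--     1222: (5, 'raise summer load'),
--     1223: (5, 'raise summer load'),
--     1231: (8, 'raise summer & lower winter'),
--     1232: (8, 'raise summer & lower winter'),
--     1233: (-2, 'lower winter load'),
--     1311: (6, 'raise summer & winter'),
--     1312: (7, 'raise peaks'),
--     1313: (7, 'raise peaks'),
--     1321: (6, 'raise summer & winter'),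
--     1322: (5, 'raise summer load'),
--     1323: (5, 'raise summer load'),
--     1331: (8, 'raise summer & lower winter'),
--     1332: (8, 'raise summer & lower winter'),
--     1333: (5, 'raise summer load'),
--     2111: (1, 'raise load'),
--     2112: (4, 'raise winter & summer'),
--     2113: (4, 'raise winter & summer'),
--     2121: (1, 'raise load'),
--     2122: (5, 'raise summer load'),
--     2123: (-2, 'lower winter load'),
--     2131: (-3, 'lower winter peak'),
--     2132: (-3, 'lower winter peak'),
--     2133: (-2, 'lower winter load'),
--     2211: (2, 'raise winter load'),
--     2212: (3, 'raise winter peak'),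
--     2213: (3, 'raise winter peak'),
--     2221: (2, 'raise winter load'),
--     2223: (-2, 'lower winter load'),
--     2231: (-3, 'lower winter peak'),
--     2232: (-3, 'lower winter peak'),
--     2233: (-2, 'lower winter load'),
--     2311: (2, 'raise winter load'),
--     2312: (3, 'raise winter peak'),
--     2313: (3, 'raise winter peak'),
--     2321: (2, 'raise winter load'),
--     2322: (-5, 'lower summer load'),
--     2323: (-1, 'lower load'),
--     2331: (-4, 'lower winter & summer'),
--     2332: (-4, 'lower winter & summer'),
--     2333: (-1, 'lower load'),
--     3111: (-5, 'lower summer load'),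
--     3112: (-8, 'lower summer & raise winter'),
--     3113: (-6, 'lower summer & winter'),
--     3121: (-5, 'lower summer load'),
--     3122: (-5, 'lower summer load'),
--     3123: (-6, 'lower summer & winter'),
--     3131: (-7, 'lower peaks'),
--     3132: (-7, 'lower peaks'),
--     3133: (-6, 'lower summer & winter'),
--     3211: (2, 'raise winter load'),
--     3212: (-8, 'lower summer & raise winter'),
--     3213: (-8, 'lower summer & raise winter'),
--     3221: (-5, 'lower summer load'),
--     3222: (-5, 'lower summer load'),
--     3231: (-7, 'lower peaks'),
--     3232: (-7, 'lower peaks'),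
--     3233: (-7, 'lower peaks'),
--     3311: (2, 'raise winter load'),
--     3312: (3, 'raise winter peak'),
--     3313: (3, 'raise winter peak'),
--     3321: (-5, 'lower summer load'),
--     3322: (-5, 'lower summer load'),
--     3323: (-6, 'lower summer & winter'),
--     3331: (-4, 'lower winter & summer'),
--     3332: (-4, 'lower winter & summer'),
--     3333: (-1, 'lower load')
-- }
--
-- def chooseAction(difs):
--     '''Using 4 main metrics, decide which action to take.'''
--     ps, es, pw, ew = difs          # a ValueError here mirrors A's unpacking
--     key = 0
--     for x in (ps, es, pw, ew):
--         key = 10 * key + _sgncode(x)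
--     return _TABLE.get(key)
-- ===== Notes on version B (the rewrite author's own statement) =====
-- stated objective: alternative
-- what changed: Replaces the per-call first-match scan over all 16 actions' code lists with a precomputed flat perfect-hash table keyed by the 4 sign codes packed arithmetically into one 4-digit integer (first action owning a code wins), and computes each sign code arithmetically instead of via an if-chain; the dead 0-in-checkVal guard (unreachable for int inputs) is dropped.
import Mathlib
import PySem

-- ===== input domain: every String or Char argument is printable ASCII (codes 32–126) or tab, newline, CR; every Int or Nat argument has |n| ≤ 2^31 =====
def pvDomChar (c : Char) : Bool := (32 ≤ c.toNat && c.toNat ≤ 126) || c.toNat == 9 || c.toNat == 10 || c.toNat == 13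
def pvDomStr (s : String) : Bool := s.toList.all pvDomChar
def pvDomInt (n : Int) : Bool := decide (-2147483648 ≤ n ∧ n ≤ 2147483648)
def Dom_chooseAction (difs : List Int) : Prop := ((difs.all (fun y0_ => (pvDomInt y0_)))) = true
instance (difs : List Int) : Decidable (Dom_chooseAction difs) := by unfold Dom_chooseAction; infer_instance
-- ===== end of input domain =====

-- B replaces A's per-call first-match scan over actionDict by a precomputed flat
-- table keyed by the 4 sign codes packed into one 4-digit integer, with the sign
-- codes computed arithmetically; the 0-in-checkVal guard, unreachable for integer
-- inputs, is dropped (objective: alternative formulation of similar cost).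

-- ===== PORT A =====
-- actionDict: key, label, coded lists (label separated from the code lists;
-- Python keeps it at index 0 of one heterogeneous list).
def actionList : List (Int × String × List (List Int)) := [
  (1, "raise load", [[1, 1, 1, 1], [2, 1, 1, 1], [2, 1, 2, 1]]),
  (-1, "lower load", [[3, 3, 3, 3], [2, 3, 3, 3], [2, 3, 2, 3]]),
  (2, "raise winter load", [[3, 3, 1, 1], [3, 2, 1, 1], [2, 3, 1, 1], [2, 2, 1, 1], [2, 3, 2, 1], [2, 2, 2, 1]]),
  (-2, "lower winter load", [[1, 1, 3, 3], [1, 2, 3, 3], [2, 1, 3, 3], [2, 2, 3, 3], [2, 1, 2, 3], [2, 2, 2, 3]]),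
  (3, "raise winter peak", [[3, 3, 1, 3], [2, 3, 1, 3], [2, 2, 1, 3], [2, 2, 1, 2], [2, 3, 1, 2], [3, 3, 1, 2]]),
  (-3, "lower winter peak", [[1, 1, 3, 1], [2, 1, 3, 1], [2, 2, 3, 1], [2, 2, 3, 2], [2, 1, 3, 2], [1, 1, 3, 2]]),
  (4, "raise winter & summer", [[1, 1, 1, 3], [2, 1, 1, 3], [2, 1, 1, 2], [1, 1, 1, 2]]),
  (-4, "lower winter & summer", [[3, 3, 3, 1], [2, 3, 3, 1], [2, 3, 3, 2], [3, 3, 3, 2]]),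
  (5, "raise summer load", [[1, 3, 3, 3], [1, 3, 2, 3], [1, 3, 2, 2], [1, 2, 2, 3], [1, 2, 2, 2], [1, 1, 2, 2], [1, 1, 2, 3], [2, 1, 2, 2]]),
  (-5, "lower summer load", [[3, 1, 1, 1], [3, 1, 2, 1], [3, 1, 2, 2], [3, 2, 2, 1], [3, 2, 2, 2], [3, 3, 2, 2], [3, 3, 2, 1], [2, 3, 2, 2]]),
  (6, "raise summer & winter", [[1, 3, 1, 1], [1, 3, 2, 1], [1, 1, 2, 1], [1, 2, 2, 1]]),
  (-6, "lower summer & winter", [[3, 1, 3, 3], [3, 1, 2, 3], [3, 3, 2, 3], [3, 1, 1, 3]]),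
  (7, "raise peaks", [[1, 3, 1, 3], [1, 3, 1, 2], [1, 2, 1, 2], [1, 2, 1, 3], [1, 2, 1, 1]]),
  (-7, "lower peaks", [[3, 1, 3, 1], [3, 1, 3, 2], [3, 2, 3, 2], [3, 2, 3, 1], [3, 2, 3, 3]]),
  (8, "raise summer & lower winter", [[1, 3, 3, 1], [1, 2, 3, 1], [1, 2, 3, 2], [1, 3, 3, 2]]),
  (-8, "lower summer & raise winter", [[3, 1, 1, 3], [3, 1, 1, 2], [3, 2, 1, 3], [3, 2, 1, 2]])]

-- A's convert(): the if/elif chain mapping a sign to 1/2/3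
def codeOf (x : Int) : Int := if x < 0 then 1 else if x = 0 then 2 else 3

-- the for-loop over actionDict.keys(): Python's `checkVal in actionDict[i]` also
-- meets the label at index 0; a list never equals a string, so membership in the
-- code lists alone is exact.
def scanA (v : List Int) : List (Int × String × List (List Int)) → Option (Int × String)
  | [] => none
  | (k, lbl, codes) :: rest => if v ∈ codes then some (k, lbl) else scanA v rest

def chooseAction (difs : List Int) : Option (Int × String) :=
  match difs with
  | [ps, es, pw, ew] =>
    let checkVal := [codeOf ps, codeOf es, codeOf pw, codeOf ew]  -- convert(difs)
    if (0 : Int) ∈ checkVal then none  -- the "Ooops" print-and-return branch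
    else scanA checkVal actionList
  | _ => none  -- Python raises ValueError here; excluded by Pre_

-- ===== PORT B =====
-- Source B's _sgncode: (x > 0) - (x < 0) + 2
def sgncode (x : Int) : Int := (if x > 0 then 1 else 0) - (if x < 0 then 1 else 0) + 2

-- Source B's _TABLE, a literal: packed 4-digit code ↦ (key, label)
def tableB : List (Int × Int × String) := [
  (1111, 1, "raise load"),
  (1112, 4, "raise winter & summer"),
  (1113, 4, "raise winter & summer"),
  (1121, 6, "raise summer & winter"),
  (1122, 5, "raise summer load"),
  (1123, 5, "raise summer load"),
  (1131, -3, "lower winter peak"),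
  (1132, -3, "lower winter peak"),
  (1133, -2, "lower winter load"),
  (1211, 7, "raise peaks"),
  (1212, 7, "raise peaks"),
  (1213, 7, "raise peaks"),
  (1221, 6, "raise summer & winter"),
  (1222, 5, "raise summer load"),
  (1223, 5, "raise summer load"),
  (1231, 8, "raise summer & lower winter"),
  (1232, 8, "raise summer & lower winter"),
  (1233, -2, "lower winter load"),
  (1311, 6, "raise summer & winter"),
  (1312, 7, "raise peaks"),
  (1313, 7, "raise peaks"),
  (1321, 6, "raise summer & winter"),
  (1322, 5, "raise summer load"),
  (1323, 5, "raise summer load"),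
  (1331, 8, "raise summer & lower winter"),
  (1332, 8, "raise summer & lower winter"),
  (1333, 5, "raise summer load"),
  (2111, 1, "raise load"),
  (2112, 4, "raise winter & summer"),
  (2113, 4, "raise winter & summer"),
  (2121, 1, "raise load"),
  (2122, 5, "raise summer load"),
  (2123, -2, "lower winter load"),
  (2131, -3, "lower winter peak"),
  (2132, -3, "lower winter peak"),
  (2133, -2, "lower winter load"),
  (2211, 2, "raise winter load"),
  (2212, 3, "raise winter peak"),
  (2213, 3, "raise winter peak"),
  (2221, 2, "raise winter load"),
  (2223, -2, "lower winter load"),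
  (2231, -3, "lower winter peak"),
  (2232, -3, "lower winter peak"),
  (2233, -2, "lower winter load"),
  (2311, 2, "raise winter load"),
  (2312, 3, "raise winter peak"),
  (2313, 3, "raise winter peak"),
  (2321, 2, "raise winter load"),
  (2322, -5, "lower summer load"),
  (2323, -1, "lower load"),
  (2331, -4, "lower winter & summer"),
  (2332, -4, "lower winter & summer"),
  (2333, -1, "lower load"),
  (3111, -5, "lower summer load"),
  (3112, -8, "lower summer & raise winter"),
  (3113, -6, "lower summer & winter"),
  (3121, -5, "lower summer load"),
  (3122, -5, "lower summer load"),
  (3123, -6, "lower summer & winter"),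
  (3131, -7, "lower peaks"),
  (3132, -7, "lower peaks"),
  (3133, -6, "lower summer & winter"),
  (3211, 2, "raise winter load"),
  (3212, -8, "lower summer & raise winter"),
  (3213, -8, "lower summer & raise winter"),
  (3221, -5, "lower summer load"),
  (3222, -5, "lower summer load"),
  (3231, -7, "lower peaks"),
  (3232, -7, "lower peaks"),
  (3233, -7, "lower peaks"),
  (3311, 2, "raise winter load"),
  (3312, 3, "raise winter peak"),
  (3313, 3, "raise winter peak"),
  (3321, -5, "lower summer load"),
  (3322, -5, "lower summer load"),
  (3323, -6, "lower summer & winter"),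
  (3331, -4, "lower winter & summer"),
  (3332, -4, "lower winter & summer"),
  (3333, -1, "lower load")]

-- the unpacking guard (ValueError unless exactly 4 metrics), then the for-loop
-- packing the key digit by digit, then _TABLE.get
def chooseAction_alt (difs : List Int) : Option (Int × String) :=
  if difs.length = 4 then
    tableB.lookup (difs.foldl (fun key x => 10 * key + sgncode x) 0)
  else none  -- Python raises ValueError here; excluded by Pre_

-- ===== PRECONDITION & SPEC =====
-- A unpacks difs into exactly 4 names and raises ValueError otherwise.
def Pre_chooseAction (difs : List Int) : Prop := difs.length = 4
instance (difs : List Int) : Decidable (Pre_chooseAction difs) := by unfold Pre_chooseAction; infer_instance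
def pvWitness_chooseAction : List Int := ([1, -1, 0, 2])
def Spec_chooseAction (difs : List Int) (out : Option (Int × String)) : Prop := out = chooseAction_alt difs
instance (difs : List Int) (out : Option (Int × String)) : Decidable (Spec_chooseAction difs out) := by unfold Spec_chooseAction; infer_instance

-- ===== CLAIM =====
def Claim_equal_chooseAction : Prop := ∀ (difs : List Int), Dom_chooseAction difs → Pre_chooseAction difs → Spec_chooseAction difs (chooseAction difs)

-- ===== LEMMAS AND PROOFS =====
theorem codeOf_cases (x : Int) : codeOf x = 1 ∨ codeOf x = 2 ∨ codeOf x = 3 := by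
  unfold codeOf; split_ifs <;> simp

theorem sgncode_eq_codeOf (x : Int) : sgncode x = codeOf x := by
  unfold sgncode codeOf; split_ifs <;> omega

-- the finite heart: on every coded 4-tuple (81 cases) A's guarded scan equals
-- B's packed-integer table lookup
theorem table_eq (v1 v2 v3 v4 : Int)
    (h1 : v1 = 1 ∨ v1 = 2 ∨ v1 = 3) (h2 : v2 = 1 ∨ v2 = 2 ∨ v2 = 3)
    (h3 : v3 = 1 ∨ v3 = 2 ∨ v3 = 3) (h4 : v4 = 1 ∨ v4 = 2 ∨ v4 = 3) :
    (if (0 : Int) ∈ [v1, v2, v3, v4] then none else scanA [v1, v2, v3, v4] actionList)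
      = tableB.lookup (1000 * v1 + 100 * v2 + 10 * v3 + v4) := by
  rcases h1 with rfl | rfl | rfl <;> rcases h2 with rfl | rfl | rfl <;>
    rcases h3 with rfl | rfl | rfl <;> rcases h4 with rfl | rfl | rfl <;> decide

theorem alt_four (a b c d : Int) : chooseAction_alt [a, b, c, d]
    = tableB.lookup (1000 * sgncode a + 100 * sgncode b + 10 * sgncode c + sgncode d) := by
  simp only [chooseAction_alt, List.foldl, List.length, if_true]
  ring_nf

theorem main_eq (a b c d : Int) : chooseAction [a, b, c, d] = chooseAction_alt [a, b, c, d] := by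
  rw [alt_four]
  simp only [chooseAction, sgncode_eq_codeOf]
  exact table_eq _ _ _ _ (codeOf_cases a) (codeOf_cases b) (codeOf_cases c) (codeOf_cases d)

-- ===== VERDICT =====
theorem chooseAction_spec : Claim_equal_chooseAction := by
  intro difs _ hpre
  unfold Pre_chooseAction at hpre
  unfold Spec_chooseAction
  match difs, hpre with
  | [a, b, c, d], _ => exact main_eq a b c d
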